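-- pv_equiv track=rewrite | github.com/deeev-sb/Algorithm | Programmers/Level1/solution(45).py | solution
-- ===== SOURCE A (Python) =====
-- def solution(price, money, count):
--     answer = 0
--
--     need = 0
--     for i in range(1, count + 1) :
--         need += price*i
--
--     answer = need - money
--     if answer < 0 :
--         answer = 0
--
--     return answer
-- ===== SOURCE B (Python) =====
-- def solution(price, money, count):
--     n = count if count > 0 else 0
--     total = price * n * (n + 1) // 2
--     shortfall = total - money
--     return shortfall if shortfall > 0 else 0
-- ===== Notes on version B (the rewrite author's own statement) =====
-- stated objective: faster
-- what changed: replaces the O(count) summation loop with the arithmetic-series closed form price*n*(n+1)//2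
import Mathlib
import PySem

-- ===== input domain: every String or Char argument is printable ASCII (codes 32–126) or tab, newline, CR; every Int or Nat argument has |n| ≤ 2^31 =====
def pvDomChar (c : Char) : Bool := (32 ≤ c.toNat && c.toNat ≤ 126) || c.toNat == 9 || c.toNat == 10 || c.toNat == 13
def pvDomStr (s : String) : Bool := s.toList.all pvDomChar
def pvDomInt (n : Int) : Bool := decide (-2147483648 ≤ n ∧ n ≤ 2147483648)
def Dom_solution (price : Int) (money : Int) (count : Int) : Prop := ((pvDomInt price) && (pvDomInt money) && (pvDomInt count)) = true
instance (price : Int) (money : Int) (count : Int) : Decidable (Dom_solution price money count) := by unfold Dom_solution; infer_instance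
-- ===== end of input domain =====

-- B replaces A's O(count) summation loop with the closed form price*n*(n+1)//2 (asymptotically faster).

-- ===== PORT A =====
def solution (price : Int) (money : Int) (count : Int) : Int :=
  let need := (PySem.List.pyRange 1 (count + 1) 1).foldl (fun need i => need + price * i) 0
  let answer := need - money
  if answer < 0 then 0 else answer

-- ===== PORT B =====
def solution_alt (price : Int) (money : Int) (count : Int) : Int :=
  let n := if count > 0 then count else 0
  let total := PySem.Int.floordiv (price * n * (n + 1)) 2
  let shortfall := total - money
  if shortfall > 0 then shortfall else 0

-- ===== PRECONDITION & SPEC =====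
def Spec_solution (price : Int) (money : Int) (count : Int) (out : Int) : Prop := out = solution_alt price money count
instance (price : Int) (money : Int) (count : Int) (out : Int) : Decidable (Spec_solution price money count out) := by unfold Spec_solution; infer_instance

-- ===== CLAIM (what is proved, stated in full; the proofs are below) =====
def Claim_equal_solution : Prop := ∀ (price : Int) (money : Int) (count : Int), Dom_solution price money count → Spec_solution price money count (solution price money count)

-- ===== LEMMAS AND PROOFS =====

/-- triangular numbers, used only in the proofs -/
def pvTri : Nat → Int
  | 0 => 0
  | n + 1 => pvTri n + (n + 1)

theorem pvTri_two_mul (n : Nat) : 2 * pvTri n = (n : Int) * (n + 1) := by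
  induction n with
  | zero => simp [pvTri]
  | succ k ih => simp only [pvTri]; push_cast; push_cast at ih; ring_nf; ring_nf at ih; omega

theorem pvFold_tri (price : Int) (n : Nat) (a : Int) :
    (PySem.List.pyRange 1 ((n : Int) + 1) 1).foldl (fun need i => need + price * i) a
      = a + price * pvTri n := by
  induction n generalizing a with
  | zero => simp [PySem.List.pyRange_one_eq_nil, pvTri]
  | succ k ih =>
      have h1 : (1 : Int) ≤ (k : Int) + 1 := by omega
      have : ((k + 1 : Nat) : Int) + 1 = ((k : Int) + 1) + 1 := by push_cast; ring
      rw [this, PySem.List.pyRange_one_succ_right h1, List.foldl_append, ih]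
      simp [pvTri]; ring

theorem solution_spec' (price money count : Int) :
    solution price money count = solution_alt price money count := by
  unfold solution solution_alt
  dsimp only
  by_cases hc : count > 0
  · have hn : count = ((count.toNat : Nat) : Int) := (Int.toNat_of_nonneg (le_of_lt hc)).symm
    rw [hn, pvFold_tri price count.toNat 0, if_pos (by omega : ((count.toNat : Nat) : Int) > 0)]
    have hdiv : PySem.Int.floordiv (price * ((count.toNat : Nat) : Int) * (((count.toNat : Nat) : Int) + 1)) 2
        = price * pvTri count.toNat := by
      rw [PySem.Int.floordiv_eq_ediv_of_pos (by norm_num)]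
      have : price * ((count.toNat : Nat) : Int) * (((count.toNat : Nat) : Int) + 1)
          = 2 * (price * pvTri count.toNat) := by
        linear_combination -price * (pvTri_two_mul count.toNat)
      rw [this, Int.mul_ediv_cancel_left _ (by norm_num)]
    rw [hdiv]
    simp only [zero_add]
    omega
  · have hempty : PySem.List.pyRange 1 (count + 1) 1 = [] :=
      PySem.List.pyRange_one_eq_nil (by omega)
    rw [hempty, if_neg hc]
    simp [PySem.Int.floordiv]
    omega

-- ===== VERDICT (by name: the statement is the Claim_ definition above) =====
theorem solution_spec : Claim_equal_solution := by
  intro price money count _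
  exact solution_spec' price money count
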